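-- pv_equiv track=rewrite | github.com/andy-612/chapter-7 | chap7.26ex.py | upto_sam
-- ===== SOURCE A (Python) =====
-- def upto_sam(namelist):
--     sum= 0
--     for i in namelist:
--         if i == "sam":
--             sum = sum+1
--             break
--         sum = sum+1
--     return sum
-- ===== SOURCE B (Python) =====
-- def upto_sam(namelist):
--     # Walk the list back-to-front; a "sam" resets the running count to 1,
--     # any other name extends it by 1.  The leftmost "sam" is processed last,
--     # so the final count is its 1-based position, or the length if absent.
--     count = 0
--     for name in reversed(namelist):
--         count = 1 if name == "sam" else count + 1
--     return count
-- ===== Notes on version B (the rewrite author's own statement) =====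
-- stated objective: alternative
-- what changed: Replaces the forward counter loop with break by a reverse (right-to-left) traversal whose accumulator resets to 1 at each 'sam' and increments otherwise, so no early exit is needed.
import Mathlib
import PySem

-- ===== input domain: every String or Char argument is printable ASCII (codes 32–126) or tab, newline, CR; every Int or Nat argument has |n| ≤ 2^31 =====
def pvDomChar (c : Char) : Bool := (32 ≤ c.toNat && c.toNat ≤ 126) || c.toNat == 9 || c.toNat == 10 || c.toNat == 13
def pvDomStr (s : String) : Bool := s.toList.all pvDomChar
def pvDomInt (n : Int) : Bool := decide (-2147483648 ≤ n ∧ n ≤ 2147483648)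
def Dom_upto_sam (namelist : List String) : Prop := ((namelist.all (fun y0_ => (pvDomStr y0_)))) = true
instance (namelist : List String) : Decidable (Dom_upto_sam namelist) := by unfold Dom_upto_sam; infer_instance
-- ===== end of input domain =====

-- ===== PORT A =====
-- A: loop with running counter, break after counting "sam"
def uptoSamLoop (sum : Int) : List String → Int
  | [] => sum
  | i :: rest => if i = "sam" then sum + 1 else uptoSamLoop (sum + 1) rest

def upto_sam (namelist : List String) : Int := uptoSamLoop 0 namelist

-- ===== PORT B =====
-- B: reverse traversal; the accumulator resets to 1 at "sam", else increments
def upto_sam_alt (namelist : List String) : Int :=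
  namelist.reverse.foldl (fun count name => if name = "sam" then 1 else count + 1) 0

-- ===== PRECONDITION & SPEC =====
def Spec_upto_sam (namelist : List String) (out : Int) : Prop := out = upto_sam_alt namelist
instance (namelist : List String) (out : Int) : Decidable (Spec_upto_sam namelist out) := by unfold Spec_upto_sam; infer_instance

-- ===== CLAIM (what is proved, stated in full; the proofs are below) =====
def Claim_equal_upto_sam : Prop := ∀ (namelist : List String), Dom_upto_sam namelist → Spec_upto_sam namelist (upto_sam namelist)

-- ===== LEMMAS AND PROOFS =====

-- ===== VERDICT (by name: the statement is the Claim_ definition above) =====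
theorem alt_foldr (namelist : List String) :
    upto_sam_alt namelist
      = namelist.foldr (fun name count => if name = "sam" then 1 else count + 1) 0 := by
  unfold upto_sam_alt
  rw [List.foldl_reverse]

theorem loop_eq (namelist : List String) (s : Int) :
    uptoSamLoop s namelist = s + upto_sam_alt namelist := by
  induction namelist generalizing s with
  | nil => simp [uptoSamLoop, upto_sam_alt]
  | cons i rest ih =>
    rw [alt_foldr] at *
    by_cases h : i = "sam"
    · simp [uptoSamLoop, List.foldr, h]
    · simp only [uptoSamLoop, if_neg h, List.foldr, ih]
      omega

theorem upto_sam_spec : Claim_equal_upto_sam := by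
  intro namelist _
  unfold Spec_upto_sam upto_sam
  rw [loop_eq]
  omega
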